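-- pv_equiv track=rewrite | github.com/ayoub3bidi/swiss-knife | development_tools/licence_header_injector.py | _detect_existing_header
-- ===== SOURCE A (Python) =====
-- from typing import Dict, List, Optional, Tuple
--
-- def _detect_existing_header(
--     content: str, comment_style: Dict
-- ) -> Optional[Tuple[int, int]]:
--     lines = content.split("\n")
--
--     # Skip shebang and encoding declarations
--     start_line = 0
--     if lines and lines[0].startswith("#!"):
--         start_line = 1
--     if len(lines) > start_line and "coding" in lines[start_line]:
--         start_line += 1
--
--     # Look for copyright/license keywords in first 50 lines
--     keywords = [
--         "copyright",
--         "license",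
--         "licensed",
--         "permission",
--         "warranty",
--         "spdx-license-identifier",
--         "all rights reserved",
--     ]
--
--     header_start = None
--     header_end = None
--     in_header = False
--
--     for i in range(start_line, min(len(lines), 50)):
--         line_lower = lines[i].lower()
--
--         # Check if line has any license keyword
--         if any(keyword in line_lower for keyword in keywords):
--             if header_start is None:
--                 header_start = i
--                 in_header = True
--             header_end = i
--         elif in_header:
--             # Check if still in comment block
--             stripped = lines[i].strip()
--             if not stripped or not any(
--                 stripped.startswith(c) for c in ["#", "//", "/*", "*", "--", "<!--"]
--             ):
--                 # End of comment block
--                 break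
--             header_end = i
--
--     if header_start is not None:
--         return (header_start, header_end + 1)
--
--     return None
-- ===== SOURCE B (Python) =====
-- from typing import Dict, List, Optional, Tuple
--
-- _KEYWORDS = [
--     "copyright", "license", "licensed", "permission", "warranty",
--     "spdx-license-identifier", "all rights reserved",
-- ]
-- _PREFIXES = ("#", "//", "/*", "*", "--", "<!--")
--
--
-- def _classify(line: str) -> int:
--     """2 = license-keyword line, 1 = comment continuation, 0 = anything else."""
--     low = line.lower()
--     if any(k in low for k in _KEYWORDS):
--         return 2
--     s = line.strip()
--     return 1 if s and s.startswith(_PREFIXES) else 0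
--
--
-- def _detect_existing_header(
--     content: str, comment_style: Dict
-- ) -> Optional[Tuple[int, int]]:
--     lines = content.split("\n")
--
--     # Skip shebang and encoding declarations
--     start_line = 0
--     if lines and lines[0].startswith("#!"):
--         start_line = 1
--     if len(lines) > start_line and "coding" in lines[start_line]:
--         start_line += 1
--
--     # Classify the candidate lines once into a tag vector, then the answer is
--     # pure arithmetic on the tags: first 2, plus the leading non-0 run after it.
--     tags = [_classify(line) for line in lines[start_line:50]]
--     if 2 not in tags:
--         return None
--     k = tags.index(2)
--     run = tags[k + 1:]
--     ext = run.index(0) if 0 in run else len(run)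
--     return (start_line + k, start_line + k + ext + 1)
-- ===== Notes on version B (the rewrite author's own statement) =====
-- stated objective: alternative
-- what changed: Replaces A's single stateful index loop (header_start/header_end/in_header flags with break) by classifying each candidate line once into a tag vector (2=keyword, 1=comment continuation, 0=other) and then computing the answer by pure list arithmetic on the tags: first index of 2, plus the length of the leading nonzero run after it.
import Mathlib
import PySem

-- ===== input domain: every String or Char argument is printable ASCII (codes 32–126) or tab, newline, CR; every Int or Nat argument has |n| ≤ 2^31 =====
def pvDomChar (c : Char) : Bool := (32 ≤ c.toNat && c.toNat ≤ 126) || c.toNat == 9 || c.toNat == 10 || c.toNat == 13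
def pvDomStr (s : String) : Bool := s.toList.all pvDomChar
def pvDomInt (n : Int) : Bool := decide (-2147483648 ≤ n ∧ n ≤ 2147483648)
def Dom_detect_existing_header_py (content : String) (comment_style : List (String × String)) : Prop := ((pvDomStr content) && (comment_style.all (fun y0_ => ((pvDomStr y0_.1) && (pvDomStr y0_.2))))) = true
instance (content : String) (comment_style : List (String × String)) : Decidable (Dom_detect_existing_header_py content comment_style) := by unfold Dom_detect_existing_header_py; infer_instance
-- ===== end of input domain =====

-- B replaces A's single stateful index loop (flags + break) by a one-shot classification of each
-- candidate line into a tag (2 = keyword, 1 = comment continuation, 0 = other) followed by pure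
-- list arithmetic on the tag vector. Objective: alternative decomposition, same cost.

-- ===== PORT A =====
-- the keyword / comment-prefix tests; the identical literal lists appear in both Pythons
def pvKwLine (line : String) : Bool :=
  ["copyright", "license", "licensed", "permission", "warranty",
   "spdx-license-identifier", "all rights reserved"].any
    (fun k => PySem.Str.isIn k (PySem.Str.lower line))

def pvCommentPrefix (s : String) : Bool :=
  ["#", "//", "/*", "*", "--", "<!--"].any (fun c => PySem.Str.startswith s c)

-- the shebang/coding preamble, identical text in both Pythons
def pvStartLine (lines : List String) : Int :=
  let s0 : Int := 0
  let s1 : Int := if decide (lines ≠ []) && PySem.Str.startswith (PySem.List.pyGetD lines 0 "") "#!" then 1 else s0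
  if decide (s1 < (lines.length : Int)) && PySem.Str.isIn "coding" (PySem.List.pyGetD lines s1 "") then s1 + 1 else s1

-- A's single stateful loop: state (header_start, header_end, in_header), break returns the state
def pvLoopA (lines : List String) : List Int → Option Int → Option Int → Bool → Option Int × Option Int
  | [], hs, he, _ => (hs, he)
  | i :: rest, hs, he, inh =>
      let line := PySem.List.pyGetD lines i ""
      if pvKwLine line then
        pvLoopA lines rest (if hs = none then some i else hs) (some i)
          (if hs = none then true else inh)
      else if inh then
        let s := PySem.Str.strip line
        if (s == "") || !pvCommentPrefix s then (hs, he)   -- break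
        else pvLoopA lines rest hs (some i) inh
      else pvLoopA lines rest hs he inh

def detect_existing_header_py (content : String) (comment_style : List (String × String)) : Option (Int × Int) :=
  let lines := (PySem.Str.split? content "\n").getD []
  let start := pvStartLine lines
  let limit : Int := min (lines.length : Int) 50
  match pvLoopA lines (PySem.List.pyRange start limit 1) none none false with
  | (some hs, he) => some (hs, he.getD hs + 1)   -- he is some whenever hs is; getD for totality
  | (none, _) => none

-- ===== PORT B =====
-- _classify: 2 = license-keyword line, 1 = comment continuation, 0 = anything else
def pvTag (line : String) : Int :=
  if pvKwLine line then 2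
  else
    let s := PySem.Str.strip line
    if !(s == "") && pvCommentPrefix s then 1 else 0

def detect_existing_header_py_alt (content : String) (comment_style : List (String × String)) : Option (Int × Int) :=
  let lines := (PySem.Str.split? content "\n").getD []
  let start := pvStartLine lines
  let tags := (PySem.List.slice lines (some start) (some 50)).map pvTag   -- [_classify(l) for l in lines[start_line:50]]
  if tags.contains 2 then
    let k : Int := ((PySem.List.index? tags 2).getD 0 : Nat)              -- tags.index(2); ".contains" guarantees the hit
    let run := PySem.List.slice tags (some (k + 1)) none                  -- tags[k+1:]
    let ext : Int := if run.contains 0 then ((PySem.List.index? run 0).getD 0 : Nat) else (run.length : Int)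
    some (start + k, start + k + ext + 1)
  else none

-- ===== PRECONDITION & SPEC =====
def Spec_detect_existing_header_py (content : String) (comment_style : List (String × String)) (out : Option (Int × Int)) : Prop := out = detect_existing_header_py_alt content comment_style
instance (content : String) (comment_style : List (String × String)) (out : Option (Int × Int)) : Decidable (Spec_detect_existing_header_py content comment_style out) := by unfold Spec_detect_existing_header_py; infer_instance

-- ===== CLAIM (what is proved, stated in full; the proofs are below) =====
def Claim_equal_detect_existing_header_py : Prop := ∀ (content : String) (comment_style : List (String × String)), Dom_detect_existing_header_py content comment_style → Spec_detect_existing_header_py content comment_style (detect_existing_header_py content comment_style)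

-- ===== LEMMAS AND PROOFS =====

-- B's "run.index(0) if 0 in run else len(run)": length of the leading nonzero run
def pvExtOf (run : List Int) : Int :=
  if run.contains 0 then ((PySem.List.index? run 0).getD 0 : Nat) else (run.length : Int)

theorem pvExtOf_nil : pvExtOf [] = 0 := by simp [pvExtOf]

theorem pvExtOf_cons_zero (r : List Int) : pvExtOf (0 :: r) = 0 := by
  simp [pvExtOf, PySem.List.index?_eq_idxOf?]

theorem pvExtOf_cons_nonzero (t : Int) (r : List Int) (h : t ≠ 0) :
    pvExtOf (t :: r) = pvExtOf r + 1 := by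
  unfold pvExtOf
  rw [PySem.List.index?_cons_of_ne r h]
  by_cases hm : (0:Int) ∈ r
  · obtain ⟨j, hj⟩ := Option.isSome_iff_exists.mp ((PySem.List.index?_isSome_iff r 0).mpr hm)
    rw [PySem.List.index?_eq_idxOf?] at hj
    simp [hm, hj]
  · simp [hm, Ne.symm h]

theorem pvExtOf_nonneg (r : List Int) : 0 ≤ pvExtOf r := by
  unfold pvExtOf; split_ifs <;> positivity

theorem pvSlice50_nil (lines : List String) (a : Int) (h0 : 0 ≤ a)
    (h : min (lines.length : Int) 50 ≤ a) :
    PySem.List.slice lines (some a) (some 50) = [] := by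
  rw [PySem.List.slice_toNat lines h0 (by norm_num)]
  by_cases hl : (lines.length : Int) ≤ 50
  · have : lines.length ≤ a.toNat := by omega
    simp [List.drop_eq_nil_of_le this]
  · simp only [List.take_eq_nil_iff]
    left
    omega

theorem pvSlice50_cons (lines : List String) (a : Int) (h0 : 0 ≤ a)
    (h : a < min (lines.length : Int) 50) :
    PySem.List.slice lines (some a) (some 50)
      = PySem.List.pyGetD lines a "" :: PySem.List.slice lines (some (a + 1)) (some 50) := by
  rw [PySem.List.slice_toNat lines h0 (by norm_num),
      PySem.List.slice_toNat lines (by omega) (by norm_num),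
      PySem.List.pyGetD_eq_getElem lines "" h0 (by omega)]
  have hlen : a.toNat < lines.length := by omega
  have hd : lines.drop a.toNat = lines[a.toNat] :: lines.drop (a.toNat + 1) :=
    List.drop_eq_getElem_cons hlen
  have h1 : (a+1).toNat = a.toNat + 1 := by omega
  have h50 : (50:Int).toNat - a.toNat = ((50:Int).toNat - (a+1).toNat) + 1 := by omega
  rw [hd, h50, List.take_succ_cons, h1]

def pvTags (lines : List String) (a : Int) : List Int :=
  (PySem.List.slice lines (some a) (some 50)).map pvTag

theorem pvLoopA_IN (lines : List String) : ∀ (n : Nat) (a hs e : Int), 0 ≤ a →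
    (PySem.List.pyRange a (min (lines.length : Int) 50) 1).length = n →
    pvLoopA lines (PySem.List.pyRange a (min (lines.length : Int) 50) 1) (some hs) (some e) true
      = (some hs, some (if pvExtOf (pvTags lines a) = 0 then e else a + pvExtOf (pvTags lines a) - 1)) := by
  intro n
  induction n with
  | zero =>
      intro a hs e h0 hlen
      have hge : min (lines.length : Int) 50 ≤ a := by
        rw [PySem.List.length_pyRange_one] at hlen; omega
      rw [PySem.List.pyRange_one_eq_nil hge]
      simp [pvLoopA, pvTags, pvSlice50_nil lines a h0 hge, pvExtOf_nil]
  | succ m ih =>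
      intro a hs e h0 hlen
      have hlt : a < min (lines.length : Int) 50 := by
        by_contra hge
        rw [PySem.List.pyRange_one_eq_nil (by omega)] at hlen
        simp at hlen
      rw [PySem.List.pyRange_one_cons hlt] at hlen ⊢
      have hlen' : (PySem.List.pyRange (a+1) (min (lines.length : Int) 50) 1).length = m := by
        simpa using hlen
      have htags : pvTags lines a = pvTag (PySem.List.pyGetD lines a "") :: pvTags lines (a+1) := by
        unfold pvTags
        rw [pvSlice50_cons lines a h0 hlt, List.map_cons]
      by_cases hk : pvKwLine (PySem.List.pyGetD lines a "") = true
      · have htag : pvTag (PySem.List.pyGetD lines a "") = 2 := by simp [pvTag, hk]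
        rw [htags, htag]
        simp only [pvLoopA, hk, if_true, reduceCtorEq, if_false]
        rw [ih (a+1) hs a (by omega) hlen']
        rw [pvExtOf_cons_nonzero 2 _ (by norm_num)]
        have hnn := pvExtOf_nonneg (pvTags lines (a+1))
        by_cases hz : pvExtOf (pvTags lines (a+1)) = 0 <;> simp [hz] <;> omega
      · have hk' : pvKwLine (PySem.List.pyGetD lines a "") = false := by simpa using hk
        by_cases hs1 : PySem.Str.strip (PySem.List.pyGetD lines a "") = ""
        · have htag : pvTag (PySem.List.pyGetD lines a "") = 0 := by simp [pvTag, hk, hs1]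
          rw [htags, htag, pvExtOf_cons_zero]
          simp [pvLoopA, hk', hs1]
        · by_cases hp : pvCommentPrefix (PySem.Str.strip (PySem.List.pyGetD lines a "")) = true
          · have htag : pvTag (PySem.List.pyGetD lines a "") = 1 := by simp [pvTag, hk, hs1, hp]
            rw [htags, htag]
            simp only [pvLoopA, hk', Bool.false_eq_true, if_false, if_true]
            rw [if_neg (by simp [hs1, hp])]
            rw [ih (a+1) hs a (by omega) hlen']
            rw [pvExtOf_cons_nonzero 1 _ (by norm_num)]
            have hnn := pvExtOf_nonneg (pvTags lines (a+1))
            by_cases hz : pvExtOf (pvTags lines (a+1)) = 0 <;> simp [hz] <;> omega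
          · have htag : pvTag (PySem.List.pyGetD lines a "") = 0 := by simp [pvTag, hk, hs1, hp]
            rw [htags, htag, pvExtOf_cons_zero]
            simp [pvLoopA, hk', hs1, hp]

theorem pvMain (lines : List String) : ∀ (n : Nat) (a : Int), 0 ≤ a →
    (PySem.List.pyRange a (min (lines.length : Int) 50) 1).length = n →
    (match pvLoopA lines (PySem.List.pyRange a (min (lines.length : Int) 50) 1) none none false with
     | (some hs, he) => some (hs, he.getD hs + 1)
     | (none, _) => (none : Option (Int × Int)))
      = (if (pvTags lines a).contains 2 then
           some (a + ((PySem.List.index? (pvTags lines a) 2).getD 0 : Nat),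
                 a + ((PySem.List.index? (pvTags lines a) 2).getD 0 : Nat)
                   + pvExtOf (PySem.List.slice (pvTags lines a) (some ((((PySem.List.index? (pvTags lines a) 2).getD 0 : Nat) : Int) + 1)) none) + 1)
         else none) := by
  intro n
  induction n with
  | zero =>
      intro a h0 hlen
      have hge : min (lines.length : Int) 50 ≤ a := by
        rw [PySem.List.length_pyRange_one] at hlen; omega
      rw [PySem.List.pyRange_one_eq_nil hge]
      simp [pvLoopA, pvTags, pvSlice50_nil lines a h0 hge]
  | succ m ih =>
      intro a h0 hlen
      have hlt : a < min (lines.length : Int) 50 := by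
        by_contra hge
        rw [PySem.List.pyRange_one_eq_nil (by omega)] at hlen
        simp at hlen
      rw [PySem.List.pyRange_one_cons hlt] at hlen ⊢
      have hlen' : (PySem.List.pyRange (a+1) (min (lines.length : Int) 50) 1).length = m := by
        simpa using hlen
      have htags : pvTags lines a = pvTag (PySem.List.pyGetD lines a "") :: pvTags lines (a+1) := by
        unfold pvTags
        rw [pvSlice50_cons lines a h0 hlt, List.map_cons]
      by_cases hk : pvKwLine (PySem.List.pyGetD lines a "") = true
      · -- keyword head: header starts here
        have htag : pvTag (PySem.List.pyGetD lines a "") = 2 := by simp [pvTag, hk]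
        rw [htags, htag]
        simp only [pvLoopA, hk, if_true]
        rw [pvLoopA_IN lines m (a+1) a a (by omega) hlen']
        have hidx : PySem.List.index? ((2:Int) :: pvTags lines (a+1)) 2 = some 0 :=
          PySem.List.index?_cons_self _ _
        have hsl : PySem.List.slice ((2:Int) :: pvTags lines (a+1)) (some (((0:Nat):Int) + 1)) none
            = pvTags lines (a+1) := by
          rw [PySem.List.slice_from _ (by norm_num)]
          norm_num
        have hnn := pvExtOf_nonneg (pvTags lines (a+1))
        simp only [hidx, Option.getD_some, hsl]
        by_cases hz : pvExtOf (pvTags lines (a+1)) = 0 <;>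
          simp [hz] <;> omega
      · -- non-keyword head: still searching
        have hk' : pvKwLine (PySem.List.pyGetD lines a "") = false := by simpa using hk
        have htag2 : pvTag (PySem.List.pyGetD lines a "") ≠ 2 := by
          by_cases hcond : (!(PySem.Str.strip (PySem.List.pyGetD lines a "") == "")
              && pvCommentPrefix (PySem.Str.strip (PySem.List.pyGetD lines a ""))) = true
          · simp [pvTag, hk', hcond]
          · simp [pvTag, hk', hcond]
        have hstep : pvLoopA lines (a :: PySem.List.pyRange (a+1) (min (lines.length : Int) 50) 1) none none false
            = pvLoopA lines (PySem.List.pyRange (a+1) (min (lines.length : Int) 50) 1) none none false := by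
          simp [pvLoopA, hk']
        rw [hstep, ih (a+1) (by omega) hlen', htags]
        by_cases hc : (pvTags lines (a+1)).contains 2
        · have hm2 : (2:Int) ∈ pvTags lines (a+1) := by simpa using hc
          obtain ⟨j, hj⟩ := Option.isSome_iff_exists.mp ((PySem.List.index?_isSome_iff _ 2).mpr hm2)
          have hcons : PySem.List.index? (pvTag (PySem.List.pyGetD lines a "") :: pvTags lines (a+1)) 2
              = some (j + 1) := by
            rw [PySem.List.index?_cons_of_ne _ htag2, hj]; rfl
          have hsl1 : PySem.List.slice (pvTag (PySem.List.pyGetD lines a "") :: pvTags lines (a+1))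
                (some (((j+1 : Nat) : Int) + 1)) none
              = PySem.List.slice (pvTags lines (a+1)) (some (((j : Nat) : Int) + 1)) none := by
            rw [PySem.List.slice_from _ (by positivity), PySem.List.slice_from _ (by positivity)]
            have h1 : (((j+1 : Nat) : Int) + 1).toNat = j + 2 := by omega
            have h2 : (((j : Nat) : Int) + 1).toNat = j + 1 := by omega
            rw [h1, h2]
            rfl
          have hcc : (pvTag (PySem.List.pyGetD lines a "") :: pvTags lines (a+1)).contains 2 = true := by
            simp only [List.contains_cons]
            simp only [List.contains_iff_mem] at hc ⊢
            simp [hm2]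
          rw [if_pos hc, if_pos hcc]
          simp only [hcons, hj, Option.getD_some, hsl1, Option.some.injEq, Prod.mk.injEq]
          constructor <;> push_cast <;> ring
        · have hnm : (2:Int) ∉ pvTags lines (a+1) := by simpa using hc
          have hcc : (pvTag (PySem.List.pyGetD lines a "") :: pvTags lines (a+1)).contains 2 = false := by
            simp only [List.contains_cons]
            simp [hnm, Ne.symm htag2]
          rw [if_neg hc, if_neg (by rw [hcc]; simp)]

theorem pvStartLine_nonneg (lines : List String) : 0 ≤ pvStartLine lines := by
  unfold pvStartLine
  split_ifs <;> simp <;> split_ifs <;> simp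

-- ===== VERDICT (by name: the statement is the Claim_ definition above) =====
theorem detect_existing_header_py_spec : Claim_equal_detect_existing_header_py := by
  intro content comment_style _
  unfold Spec_detect_existing_header_py detect_existing_header_py detect_existing_header_py_alt
  exact pvMain ((PySem.Str.split? content "\n").getD [])
    (PySem.List.pyRange (pvStartLine ((PySem.Str.split? content "\n").getD []))
      (min ((((PySem.Str.split? content "\n").getD []).length : Int)) 50) 1).length
    (pvStartLine ((PySem.Str.split? content "\n").getD []))
    (pvStartLine_nonneg _) rfl
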